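-- pv_equiv track=rewrite | github.com/astronstar/LearningJournal-Code | SentenceParaphrase/TemplateMatching/SentenceRepeat.py | cal_index_diff_value
-- ===== SOURCE A (Python) =====
-- def cal_index_diff_value(the_list):
-- 	"""
-- 	返回列表中满足条件(相邻元素的差值是否为1)的元素的索引号
-- 	:param the_list: 输入列表
-- 	:return: 满足条件的元素索引号(list嵌套list格式)
-- 	"""
-- 	result, temp_list = [], []
-- 	for i in range(1, len(the_list)):
-- 		if the_list[i] - the_list[i - 1] == 1:
-- 			temp_list.append(i - 1)
-- 			temp_list.append(i)
-- 		else: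
-- 			if len(temp_list) > 0:
-- 				# result.extend(sorted(list(set(temp_list))))
-- 				result.append(sorted(list(set(temp_list))))
-- 			temp_list = []
-- 	if len(temp_list) > 0:
-- 		# result.extend(sorted(list(set(temp_list))))
-- 		result.append(sorted(list(set(temp_list))))
--
-- 	return result
-- ===== SOURCE B (Python) =====
-- def cal_index_diff_value(the_list):
--     """Single pass: track the start of the current +1-run and emit each
--     run's index range directly (no set/sort)."""
--     result = []
--     run_start = None
--     for i in range(1, len(the_list)):
--         if the_list[i] - the_list[i - 1] == 1:
--             if run_start is None:
--                 run_start = i - 1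
--         else:
--             if run_start is not None:
--                 result.append(list(range(run_start, i)))
--                 run_start = None
--     if run_start is not None:
--         result.append(list(range(run_start, len(the_list))))
--     return result
-- ===== Notes on version B (the rewrite author's own statement) =====
-- stated objective: alternative
-- what changed: Instead of accumulating duplicated endpoint indices per run and then deduplicating with set() and sorting, B tracks only the start index of the current +1-run and emits list(range(start, end)) directly in one pass.
import Mathlib
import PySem

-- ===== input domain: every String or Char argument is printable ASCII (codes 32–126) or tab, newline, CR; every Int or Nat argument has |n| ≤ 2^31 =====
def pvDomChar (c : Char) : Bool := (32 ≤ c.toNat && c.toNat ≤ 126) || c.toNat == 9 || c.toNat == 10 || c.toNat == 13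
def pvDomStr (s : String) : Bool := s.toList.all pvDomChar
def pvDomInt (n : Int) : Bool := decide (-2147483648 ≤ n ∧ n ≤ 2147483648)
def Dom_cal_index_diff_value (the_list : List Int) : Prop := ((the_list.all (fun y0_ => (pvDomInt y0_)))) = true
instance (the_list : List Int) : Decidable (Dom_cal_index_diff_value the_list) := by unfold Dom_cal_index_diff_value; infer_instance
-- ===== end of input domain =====

-- B replaces A's per-run set()+sorted() dedup by a single pass that tracks each run's start index and emits the index range directly (no per-run dedup/sort).


-- ===== PORT A =====
-- sorted(list(set(xs))) (identity key; iterating the set is safe here because the result is immediately sorted)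
def pvSortedSet (xs : List Int) : List Int :=
  PySem.List.sorted (PySem.Set.ofList xs) (fun x => x) false

-- the body of A's for-loop; state = (result, temp_list)
def pvStepA (l : List Int) (s : List (List Int) × List Int) (i : Int) :
    List (List Int) × List Int :=
  if PySem.List.pyGetD l i 0 - PySem.List.pyGetD l (i - 1) 0 = 1 then
    (s.1, s.2 ++ [i - 1, i])
  else if s.2.length > 0 then
    (s.1 ++ [pvSortedSet s.2], [])
  else
    (s.1, [])

def cal_index_diff_value (the_list : List Int) : List (List Int) :=
  let st := (PySem.List.pyRange 1 (PySem.List.len the_list) 1).foldl (pvStepA the_list) ([], [])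
  if st.2.length > 0 then st.1 ++ [pvSortedSet st.2] else st.1

-- ===== PORT B =====
-- the body of B's for-loop; state = (result, run_start)
def pvStepB (l : List Int) (s : List (List Int) × Option Int) (i : Int) :
    List (List Int) × Option Int :=
  if PySem.List.pyGetD l i 0 - PySem.List.pyGetD l (i - 1) 0 = 1 then
    (s.1, match s.2 with | none => some (i - 1) | some rs => some rs)
  else
    match s.2 with
    | some rs => (s.1 ++ [PySem.List.pyRange rs i 1], none)
    | none => (s.1, none)

def cal_index_diff_value_alt (the_list : List Int) : List (List Int) :=
  let st := (PySem.List.pyRange 1 (PySem.List.len the_list) 1).foldl (pvStepB the_list) ([], none)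
  match st.2 with
  | some rs => st.1 ++ [PySem.List.pyRange rs (PySem.List.len the_list) 1]
  | none => st.1

-- ===== PRECONDITION & SPEC =====
def Spec_cal_index_diff_value (the_list : List Int) (out : List (List Int)) : Prop := out = cal_index_diff_value_alt the_list
instance (the_list : List Int) (out : List (List Int)) : Decidable (Spec_cal_index_diff_value the_list out) := by unfold Spec_cal_index_diff_value; infer_instance

-- ===== CLAIM (what is proved, stated in full; the proofs are below) =====
def Claim_equal_cal_index_diff_value : Prop := ∀ (the_list : List Int), Dom_cal_index_diff_value the_list → Spec_cal_index_diff_value the_list (cal_index_diff_value the_list)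

-- ===== LEMMAS AND PROOFS =====

-- the temp_list A has accumulated for a run that started at index s and has reached index j
def pvT (s j : Int) : List Int :=
  (PySem.List.pyRange (s + 1) (j + 1) 1).flatMap (fun k => [k - 1, k])

-- A's wrap-up of its final loop state
def pvFinA (st : List (List Int) × List Int) : List (List Int) :=
  if st.2.length > 0 then st.1 ++ [pvSortedSet st.2] else st.1

-- B's wrap-up of its final loop state (b = len the_list)
def pvFinB (b : Int) (st : List (List Int) × Option Int) : List (List Int) :=
  match st.2 with
  | some rs => st.1 ++ [PySem.List.pyRange rs b 1]
  | none => st.1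

lemma pvT_self_succ (s : Int) : pvT s (s + 1) = [s, s + 1] := by simp [pvT]

lemma pvT_append (s j : Int) (h : s ≤ j) : pvT s j ++ [j, j + 1] = pvT s (j + 1) := by
  unfold pvT
  rw [PySem.List.pyRange_one_succ_right (by omega : s + 1 ≤ j + 1)]
  simp

lemma pvT_ne_nil (s j : Int) (h : s < j) : pvT s j ≠ [] := by
  unfold pvT
  rw [PySem.List.pyRange_one_cons (by omega : s + 1 < j + 1)]
  simp

lemma ofList_pvT (s j : Int) (hj : s + 1 ≤ j) :
    PySem.Set.ofList (pvT s j) = PySem.List.pyRange s (j + 1) 1 := by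
  induction j, hj using Int.le_induction with
  | base =>
    rw [pvT_self_succ]
    rw [PySem.List.pyRange_one_cons (by omega), PySem.List.pyRange_one_cons (by omega),
        PySem.List.pyRange_one_eq_nil (by omega)]
    simp [PySem.Set.ofList, PySem.Set.add]
  | succ j hj ih =>
    rw [← pvT_append s j (by omega)]
    rw [PySem.Set.ofList_eq_foldl, List.foldl_append, ← PySem.Set.ofList_eq_foldl, ih]
    have h1 : PySem.Set.add (PySem.List.pyRange s (j + 1) 1) j = PySem.List.pyRange s (j + 1) 1 := by
      simp [PySem.Set.add, PySem.Set.contains]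
      omega
    simp [List.foldl, h1, PySem.List.pyRange_one_succ_right (by omega : s ≤ j + 1)]

lemma sortedSet_pvT (s j : Int) (h : s + 1 ≤ j) :
    pvSortedSet (pvT s j) = PySem.List.pyRange s (j + 1) 1 := by
  rw [pvSortedSet, ofList_pvT s j h]
  exact PySem.List.sorted_eq_of_perm_of_pairwise_lt _ _ (fun x => x) (List.Perm.refl _)
    (PySem.List.pairwise_lt_pyRange_one s (j + 1))

lemma pvT_pred (i : Int) : pvT (i - 1) i = [i - 1, i] := by
  have h := pvT_self_succ (i - 1)
  rw [show i - 1 + 1 = i by ring] at h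
  exact h

lemma pvT_append_pred (s i : Int) (h : s + 2 ≤ i) : pvT s (i - 1) ++ [i - 1, i] = pvT s i := by
  have h2 := pvT_append s (i - 1) (by omega)
  rw [show i - 1 + 1 = i by ring] at h2
  exact h2

-- the loop invariant, propagated along the shared index range: results agree, and
-- temp_list is [] iff run_start is none, else temp_list is exactly the run from run_start
lemma pvLoop (l : List Int) (b : Int) : ∀ (k : Nat) (i : Int), b = i + k →
    ∀ (res : List (List Int)) (temp : List Int) (rs : Option Int),
    ((temp = [] ∧ rs = none) ∨ (∃ s, rs = some s ∧ s + 2 ≤ i ∧ temp = pvT s (i - 1))) →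
    pvFinA ((PySem.List.pyRange i b 1).foldl (pvStepA l) (res, temp))
      = pvFinB b ((PySem.List.pyRange i b 1).foldl (pvStepB l) (res, rs)) := by
  intro k
  induction k with
  | zero =>
    intro i hb res temp rs hinv
    rw [PySem.List.pyRange_one_eq_nil (by omega)]
    simp only [List.foldl_nil]
    rcases hinv with ⟨ht, hr⟩ | ⟨s, hr, hs, ht⟩
    · simp [pvFinA, pvFinB, ht, hr]
    · subst ht; subst hr
      have hne := pvT_ne_nil s (i - 1) (by omega)
      simp [pvFinA, pvFinB, List.length_pos_iff.mpr hne]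
      have hib : i - 1 + 1 = b := by omega
      rw [sortedSet_pvT s (i - 1) (by omega), hib]
  | succ k ih =>
    intro i hb res temp rs hinv
    rw [PySem.List.pyRange_one_cons (by omega : i < b)]
    simp only [List.foldl_cons]
    by_cases hd : PySem.List.pyGetD l i 0 - PySem.List.pyGetD l (i - 1) 0 = 1
    · rcases hinv with ⟨ht, hr⟩ | ⟨s, hr, hs, ht⟩
      · rw [show pvStepA l (res, temp) i = (res, pvT (i-1) i) by
              simp [pvStepA, hd, ht, pvT_pred],
            show pvStepB l (res, rs) i = (res, some (i-1)) by simp [pvStepB, hd, hr]]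
        refine ih (i+1) (by omega) res _ _ (Or.inr ⟨i-1, rfl, by omega, ?_⟩)
        rw [show i + 1 - 1 = i by ring]
      · rw [show pvStepA l (res, temp) i = (res, pvT s i) by
              simp [pvStepA, hd, ht, pvT_append_pred s i hs],
            show pvStepB l (res, rs) i = (res, some s) by simp [pvStepB, hd, hr]]
        refine ih (i+1) (by omega) res _ _ (Or.inr ⟨s, rfl, by omega, ?_⟩)
        rw [show i + 1 - 1 = i by ring]
    · rcases hinv with ⟨ht, hr⟩ | ⟨s, hr, hs, ht⟩
      · rw [show pvStepA l (res, temp) i = (res, []) by simp [pvStepA, hd, ht],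
            show pvStepB l (res, rs) i = (res, none) by simp [pvStepB, hd, hr]]
        exact ih (i+1) (by omega) res _ _ (Or.inl ⟨rfl, rfl⟩)
      · subst ht; subst hr
        have hne := pvT_ne_nil s (i - 1) (by omega)
        rw [show pvStepA l (res, pvT s (i-1)) i = (res ++ [PySem.List.pyRange s i 1], []) by
              simp only [pvStepA, hd, if_false]
              rw [if_pos (List.length_pos_iff.mpr hne), sortedSet_pvT s (i-1) (by omega)]
              rw [show i - 1 + 1 = i by ring],
            show pvStepB l (res, some s) i = (res ++ [PySem.List.pyRange s i 1], none) by
              simp [pvStepB, hd]]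
        exact ih (i+1) (by omega) _ _ _ (Or.inl ⟨rfl, rfl⟩)

-- ===== VERDICT (by name: the statement is the Claim_ definition above) =====
theorem cal_index_diff_value_spec : Claim_equal_cal_index_diff_value := by
  intro l _
  unfold Spec_cal_index_diff_value cal_index_diff_value cal_index_diff_value_alt
  rcases l with _ | ⟨x, xs⟩
  · rfl
  · exact pvLoop (x::xs) (PySem.List.len (x::xs)) (PySem.List.len (x::xs) - 1).toNat 1
      (by simp [PySem.List.len]; omega) [] [] none (Or.inl ⟨rfl, rfl⟩)
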